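-- pv_equiv track=rewrite | github.com/jakapongh/iccs101 | homework/hw_06/eto.py | eto
-- ===== SOURCE A (Python) =====
-- def eto(lst: list[int]) -> list[int]:
--     # Even numbers appear before odd numbers
--     # Needs to be recursive function
--
--     # Base case is that len lst is 0
--     if len(lst) == 0: return []
--
--     keep = lst[0]
--     rest = lst[1:]
--
--     friend_answer = eto(rest)
--     if keep % 2 != 0:
--         friend_answer.append(keep)
--     else:
--         friend_answer.insert(0, keep)
--
--     return friend_answer
-- ===== SOURCE B (Python) =====
-- def eto(lst: list[int]) -> list[int]:
--     evens = []
--     odds = []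
--     for x in lst:
--         if x % 2 == 0:
--             evens.append(x)
--         else:
--             odds.append(x)
--     return evens + odds[::-1]
-- ===== Notes on version B (the rewrite author's own statement) =====
-- stated objective: faster
-- what changed: Replaces the recursion with front-inserts/appends by a single pass partitioning into evens and odds, returning evens + reversed odds.
import Mathlib
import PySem

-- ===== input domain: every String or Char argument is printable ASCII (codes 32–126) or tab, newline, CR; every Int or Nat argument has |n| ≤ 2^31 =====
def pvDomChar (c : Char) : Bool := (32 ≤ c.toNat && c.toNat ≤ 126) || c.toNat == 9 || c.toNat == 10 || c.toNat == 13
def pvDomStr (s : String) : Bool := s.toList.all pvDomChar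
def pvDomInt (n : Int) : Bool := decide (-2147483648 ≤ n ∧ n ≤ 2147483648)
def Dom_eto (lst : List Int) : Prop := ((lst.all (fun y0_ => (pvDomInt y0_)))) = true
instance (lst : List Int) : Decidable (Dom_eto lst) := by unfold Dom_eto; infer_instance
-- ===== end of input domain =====

-- B is a single left-to-right partition pass returning evens + reversed odds: O(n) instead of A's
-- recursion with a front-insert per even element.

-- ===== PORT A =====
-- A: recursion on the list; odd head appended to the recursive answer, even head inserted at position 0.
def eto (lst : List Int) : List Int :=
  match lst with
  | [] => []
  | keep :: rest =>
    let friend_answer := eto rest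
    if PySem.Int.mod keep 2 ≠ 0 then friend_answer ++ [keep]
    else keep :: friend_answer

-- ===== PORT B =====
-- B: one fold partitioning into (evens, odds) in encounter order, then evens ++ odds.reverse.
def eto_alt (lst : List Int) : List Int :=
  let p := lst.foldl
    (fun (acc : List Int × List Int) x =>
      if PySem.Int.mod x 2 == 0 then (acc.1 ++ [x], acc.2) else (acc.1, acc.2 ++ [x]))
    ([], [])
  p.1 ++ p.2.reverse

-- ===== PRECONDITION & SPEC =====
def Spec_eto (lst : List Int) (out : List Int) : Prop := out = eto_alt lst
instance (lst : List Int) (out : List Int) : Decidable (Spec_eto lst out) := by unfold Spec_eto; infer_instance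

-- ===== CLAIM (what is proved, stated in full; the proofs are below) =====
def Claim_equal_eto : Prop := ∀ (lst : List Int), Dom_eto lst → Spec_eto lst (eto lst)

-- ===== LEMMAS AND PROOFS =====

theorem fmod_two_eq (x : Int) : PySem.Int.mod x 2 = x % 2 := by
  simp [PySem.Int.mod, Int.fmod_eq_emod]

theorem eto_foldl_acc (lst : List Int) (e o : List Int) :
    lst.foldl
      (fun (acc : List Int × List Int) x =>
        if PySem.Int.mod x 2 == 0 then (acc.1 ++ [x], acc.2) else (acc.1, acc.2 ++ [x]))
      (e, o)
    = (e ++ lst.filter (fun x => PySem.Int.mod x 2 == 0),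
       o ++ lst.filter (fun x => !(PySem.Int.mod x 2 == 0))) := by
  induction lst generalizing e o with
  | nil => simp
  | cons x xs ih =>
    rw [List.foldl_cons]
    rcases Int.emod_two_eq_zero_or_one x with h | h
    · rw [if_pos (by simp [fmod_two_eq, h]), ih]
      simp [List.filter_cons, fmod_two_eq, h]
    · rw [if_neg (by simp [fmod_two_eq, h]), ih]
      simp [List.filter_cons, fmod_two_eq, h]

theorem eto_alt_eq (lst : List Int) :
    eto_alt lst = lst.filter (fun x => PySem.Int.mod x 2 == 0)
      ++ (lst.filter (fun x => !(PySem.Int.mod x 2 == 0))).reverse := by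
  rw [eto_alt]
  rw [eto_foldl_acc]
  simp

theorem eto_eq (lst : List Int) :
    eto lst = lst.filter (fun x => PySem.Int.mod x 2 == 0)
      ++ (lst.filter (fun x => !(PySem.Int.mod x 2 == 0))).reverse := by
  induction lst with
  | nil => simp [eto]
  | cons k rest ih =>
    rcases Int.emod_two_eq_zero_or_one k with h | h <;>
      · simp only [eto, List.filter_cons, fmod_two_eq, h, ih]
        simp

-- ===== VERDICT (by name: the statement is the Claim_ definition above) =====
theorem eto_spec : Claim_equal_eto := by
  intro lst _
  unfold Spec_eto
  rw [eto_eq, eto_alt_eq]
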